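-- pv_equiv track=rewrite | github.com/apexneuralecosystems/AI-Resume-Builder | backend/app/services/section_integrity.py | _dedupe_by_canonical_gap
-- ===== SOURCE A (Python) =====
-- from collections import OrderedDict, defaultdict
--
-- def _dedupe_by_canonical_gap(gaps: list[dict[str, str]]) -> list[dict[str, str]]:
--     merged: OrderedDict[str, dict[str, str]] = OrderedDict()
--     for gap in gaps:
--         ck = gap.get("canonical") or ""
--         if not ck:
--             continue
--         if ck not in merged or len(gap.get("verbatimPreview", "")) > len(merged[ck].get("verbatimPreview", "")):
--             merged[ck] = gap
--     return list(merged.values())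
-- ===== SOURCE B (Python) =====
-- def _dedupe_by_canonical_gap(gaps: list[dict[str, str]]) -> list[dict[str, str]]:
--     keys: list[str] = []
--     for g in gaps:
--         ck = g.get("canonical") or ""
--         if ck and ck not in keys:
--             keys.append(ck)
--     return [max((g for g in gaps if (g.get("canonical") or "") == ck),
--                 key=lambda g: len(g.get("verbatimPreview", "")))
--             for ck in keys]
-- ===== Notes on version B (the rewrite author's own statement) =====
-- stated objective: alternative
-- what changed: Replaced A's single-pass ordered dict of current winners (compare-and-overwrite per gap) by a dict-free two-stage scheme: collect the distinct non-empty canonical keys in first-appearance order, then for each key pick the first longest-preview gap with max over a filter of the whole list.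
import Mathlib
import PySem

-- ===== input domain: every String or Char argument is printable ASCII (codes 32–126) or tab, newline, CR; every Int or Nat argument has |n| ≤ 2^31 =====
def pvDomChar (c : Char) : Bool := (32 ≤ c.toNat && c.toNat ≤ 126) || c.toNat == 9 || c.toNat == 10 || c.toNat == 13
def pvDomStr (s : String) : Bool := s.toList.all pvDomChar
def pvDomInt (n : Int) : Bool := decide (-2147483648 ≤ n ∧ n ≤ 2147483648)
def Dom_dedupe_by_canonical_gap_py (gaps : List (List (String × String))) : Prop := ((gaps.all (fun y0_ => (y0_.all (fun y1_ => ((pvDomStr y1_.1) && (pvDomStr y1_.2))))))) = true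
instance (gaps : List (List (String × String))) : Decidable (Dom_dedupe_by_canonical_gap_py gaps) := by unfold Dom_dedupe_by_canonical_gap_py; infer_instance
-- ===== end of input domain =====

-- B is dict-free: it first collects the distinct non-empty canonical keys in
-- first-appearance order, then for each key picks the first longest-preview gap
-- with max over a filter of the whole list; objective: alternative decomposition.

-- shared field accessors: gap.get("canonical") or ""  /  len(gap.get("verbatimPreview", ""))
def pvCanon (gap : List (String × String)) : String :=
  (PySem.Dict.mk gap).getD "canonical" ""
def pvPrevLen (gap : List (String × String)) : Int :=
  PySem.Str.len ((PySem.Dict.mk gap).getD "verbatimPreview" "")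

-- ===== PORT A =====
def pvMergeStep (merged : PySem.Dict String (List (String × String)))
    (gap : List (String × String)) : PySem.Dict String (List (String × String)) :=
  let ck := pvCanon gap
  if ck = "" then merged
  else if merged.contains ck = false ∨ pvPrevLen gap > pvPrevLen (merged.getD ck []) then
    merged.insert ck gap
  else merged

def dedupe_by_canonical_gap_py (gaps : List (List (String × String))) : List (List (String × String)) :=
  (gaps.foldl pvMergeStep PySem.Dict.empty).values

-- ===== PORT B =====
-- first pass: distinct non-empty canonical keys, first-appearance order
def pvKeys (gaps : List (List (String × String))) : List String :=
  gaps.foldl (fun ks g =>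
    if pvCanon g = "" ∨ pvCanon g ∈ ks then ks else ks ++ [pvCanon g]) []

-- max((g for g in gaps if (g.get("canonical") or "") == ck), key=len-of-preview)
def pvWinner (gaps : List (List (String × String))) (ck : String) : List (String × String) :=
  (PySem.List.max? (gaps.filter (fun g => pvCanon g = ck)) pvPrevLen).getD []

def dedupe_by_canonical_gap_py_alt (gaps : List (List (String × String))) : List (List (String × String)) :=
  (pvKeys gaps).map (pvWinner gaps)

-- ===== PRECONDITION & SPEC =====
def Spec_dedupe_by_canonical_gap_py (gaps : List (List (String × String))) (out : List (List (String × String))) : Prop := out = dedupe_by_canonical_gap_py_alt gaps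
instance (gaps : List (List (String × String))) (out : List (List (String × String))) : Decidable (Spec_dedupe_by_canonical_gap_py gaps out) := by unfold Spec_dedupe_by_canonical_gap_py; infer_instance

-- ===== CLAIM (what is proved, stated in full; the proofs are below) =====
def Claim_equal_dedupe_by_canonical_gap_py : Prop := ∀ (gaps : List (List (String × String))), Dom_dedupe_by_canonical_gap_py gaps → Spec_dedupe_by_canonical_gap_py gaps (dedupe_by_canonical_gap_py gaps)

-- ===== LEMMAS AND PROOFS =====

-- the key-collecting step of pvKeys, named for reuse
def pvKeyStep (ks : List String) (g : List (String × String)) : List String :=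
  if pvCanon g = "" ∨ pvCanon g ∈ ks then ks else ks ++ [pvCanon g]

theorem pvKeys_eq_foldl (gaps : List (List (String × String))) :
    pvKeys gaps = gaps.foldl pvKeyStep [] := rfl

theorem pvKeyStep_mono (ks : List String) (g : List (String × String)) (k : String)
    (h : k ∈ ks) : k ∈ pvKeyStep ks g := by
  unfold pvKeyStep; split
  · exact h
  · exact List.mem_append_left _ h

theorem pv_foldl_keys_mono (gaps : List (List (String × String))) (ks : List String)
    (k : String) (h : k ∈ ks) : k ∈ gaps.foldl pvKeyStep ks := by
  induction gaps generalizing ks with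
  | nil => exact h
  | cons g t ih => exact ih _ (pvKeyStep_mono ks g k h)

theorem pv_mem_foldl_keys (gaps : List (List (String × String))) (ks : List String)
    (g : List (String × String)) (hg : g ∈ gaps) (hck : pvCanon g ≠ "") :
    pvCanon g ∈ gaps.foldl pvKeyStep ks := by
  induction gaps generalizing ks with
  | nil => cases hg
  | cons h t ih =>
    rcases List.mem_cons.mp hg with rfl | hmem
    · rw [List.foldl_cons]
      apply pv_foldl_keys_mono
      unfold pvKeyStep
      by_cases hin : pvCanon g = "" ∨ pvCanon g ∈ ks
      · rw [if_pos hin]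
        rcases hin with h' | h'
        · exact absurd h' hck
        · exact h'
      · rw [if_neg hin]; exact List.mem_append_right _ (List.mem_singleton.mpr rfl)
    · exact ih _ hmem

theorem pv_foldl_keys_ne_empty (gaps : List (List (String × String))) (ks : List String)
    (hks : ∀ k ∈ ks, k ≠ "") : ∀ k ∈ gaps.foldl pvKeyStep ks, k ≠ "" := by
  induction gaps generalizing ks with
  | nil => exact hks
  | cons g t ih =>
    refine ih _ ?_
    intro k hk
    unfold pvKeyStep at hk
    split at hk
    · exact hks k hk
    · rcases List.mem_append.mp hk with h' | h'
      · exact hks k h'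
      · rename_i hno
        rw [List.mem_singleton.mp h']
        exact fun he => hno (Or.inl he)

theorem pv_foldl_keys_nodup (gaps : List (List (String × String))) (ks : List String)
    (hnd : ks.Nodup) : (gaps.foldl pvKeyStep ks).Nodup := by
  induction gaps generalizing ks with
  | nil => exact hnd
  | cons g t ih =>
    refine ih _ ?_
    unfold pvKeyStep
    split
    · exact hnd
    · rename_i hno
      exact hnd.append (List.nodup_singleton _)
        (fun a ha hb => hno (Or.inr ((List.mem_singleton.mp hb) ▸ ha)))

theorem pvKeys_nodup (gaps : List (List (String × String))) : (pvKeys gaps).Nodup :=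
  pv_foldl_keys_nodup gaps [] List.nodup_nil

theorem pvKeys_ne_empty (gaps : List (List (String × String))) :
    ∀ k ∈ pvKeys gaps, k ≠ "" :=
  pv_foldl_keys_ne_empty gaps [] (by simp)

theorem pv_filter_nil_of_not_key (gaps : List (List (String × String)))
    (ck : String) (hck : ck ≠ "") (h : ck ∉ pvKeys gaps) :
    gaps.filter (fun g => pvCanon g = ck) = [] := by
  rw [List.filter_eq_nil_iff]
  intro g hg
  simp only [decide_eq_true_eq]
  intro heq
  exact h (heq ▸ pv_mem_foldl_keys gaps [] g hg (heq ▸ hck))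

theorem pv_max?_singleton (x : List (String × String)) :
    PySem.List.max? [x] pvPrevLen = some x := by
  simp [PySem.List.max?]

theorem pv_max?_snoc (xs : List (List (String × String))) (x cur : List (String × String))
    (h : PySem.List.max? xs pvPrevLen = some cur) :
    PySem.List.max? (xs ++ [x]) pvPrevLen
      = some (if pvPrevLen cur < pvPrevLen x then x else cur) := by
  simp only [PySem.List.max?, List.foldl_append] at *
  rw [h]
  by_cases hlt : pvPrevLen cur < pvPrevLen x <;> simp [hlt]

-- invariant: after processing a prefix "pre", A's dict has exactly the keys of
-- pvKeys pre and, per key, the max-by-preview gap among the prefix's matching gaps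
def pvInv (m : PySem.Dict String (List (String × String)))
    (pre : List (List (String × String))) : Prop :=
  m.keys = pvKeys pre ∧
    ∀ k ∈ pvKeys pre,
      PySem.List.max? (pre.filter (fun g => pvCanon g = k)) pvPrevLen = some (m.getD k [])

theorem pvKeys_snoc (pre : List (List (String × String))) (gap : List (String × String)) :
    pvKeys (pre ++ [gap]) = pvKeyStep (pvKeys pre) gap := by
  rw [pvKeys_eq_foldl, pvKeys_eq_foldl, List.foldl_append]; rfl

theorem pv_step_inv (m : PySem.Dict String (List (String × String)))
    (pre : List (List (String × String))) (gap : List (String × String))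
    (h : pvInv m pre) : pvInv (pvMergeStep m gap) (pre ++ [gap]) := by
  obtain ⟨hk, hv⟩ := h
  have hfilter : ∀ k, (pre ++ [gap]).filter (fun g => pvCanon g = k)
      = pre.filter (fun g => pvCanon g = k) ++ if pvCanon gap = k then [gap] else [] := by
    intro k
    rw [List.filter_append]
    congr 1
    by_cases hgk : pvCanon gap = k <;> simp [hgk]
  by_cases hck : pvCanon gap = ""
  · -- skipped gap: nothing changes, and no key of pvKeys pre equals ""
    have hA : pvMergeStep m gap = m := by simp [pvMergeStep, hck]
    have hkeys : pvKeys (pre ++ [gap]) = pvKeys pre := by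
      rw [pvKeys_snoc]; unfold pvKeyStep; rw [if_pos (Or.inl hck)]
    refine ⟨by rw [hA, hkeys, hk], ?_⟩
    intro k hkm
    rw [hkeys] at hkm
    rw [hA, hfilter, if_neg (by intro he; exact pvKeys_ne_empty pre k hkm (he ▸ hck)),
      List.append_nil]
    exact hv k hkm
  · have hcont : m.contains (pvCanon gap) = decide (pvCanon gap ∈ pvKeys pre) := by
      rw [PySem.Dict.contains_eq_decide_mem_keys, hk]
    by_cases hmem : pvCanon gap ∈ pvKeys pre
    · -- existing key: A compares previews in place; key list unchanged
      have hcm : m.contains (pvCanon gap) = true := by rw [hcont]; simpa using hmem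
      have hkeys : pvKeys (pre ++ [gap]) = pvKeys pre := by
        rw [pvKeys_snoc]; unfold pvKeyStep; rw [if_pos (Or.inr hmem)]
      have hmax := hv (pvCanon gap) hmem
      have hAm : pvMergeStep m gap
          = if pvPrevLen gap > pvPrevLen (m.getD (pvCanon gap) []) then
              m.insert (pvCanon gap) gap else m := by
        simp [pvMergeStep, hck, hcm]
      have hkeysA : (pvMergeStep m gap).keys = m.keys := by
        rw [hAm]; split
        · exact PySem.Dict.keys_insert_of_contains _ _ hcm
        · rfl
      refine ⟨by rw [hkeysA, hkeys, hk], ?_⟩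
      intro k hkm
      rw [hkeys] at hkm
      by_cases hkk : pvCanon gap = k
      · subst hkk
        rw [hfilter, if_pos rfl, pv_max?_snoc _ _ _ hmax, hAm]
        by_cases hlt : pvPrevLen gap > pvPrevLen (m.getD (pvCanon gap) [])
        · rw [if_pos hlt, if_pos (by exact hlt), PySem.Dict.getD_insert, if_pos rfl]
        · rw [if_neg hlt, if_neg (by exact hlt)]
      · rw [hfilter, if_neg hkk, List.append_nil, hAm]
        have hA' : (if pvPrevLen gap > pvPrevLen (m.getD (pvCanon gap) []) then
            m.insert (pvCanon gap) gap else m).getD k [] = m.getD k [] := by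
          split
          · rw [PySem.Dict.getD_insert, if_neg (fun he => hkk he.symm)]
          · rfl
        rw [hA']
        exact hv k hkm
    · -- fresh key: A inserts; both key lists gain pvCanon gap at the end
      have hcm : m.contains (pvCanon gap) = false := by rw [hcont]; simpa using hmem
      have hAm : pvMergeStep m gap = m.insert (pvCanon gap) gap := by
        simp [pvMergeStep, hck, hcm]
      have hkeys : pvKeys (pre ++ [gap]) = pvKeys pre ++ [pvCanon gap] := by
        rw [pvKeys_snoc]; unfold pvKeyStep
        rw [if_neg (by push Not; exact ⟨hck, hmem⟩)]
      have hkeysA : (pvMergeStep m gap).keys = m.keys ++ [pvCanon gap] := by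
        rw [hAm]; exact PySem.Dict.keys_insert_of_not_contains _ _ hcm
      refine ⟨by rw [hkeysA, hkeys, hk], ?_⟩
      intro k hkm
      rw [hkeys] at hkm
      rw [hAm, PySem.Dict.getD_insert]
      by_cases hkk : k = pvCanon gap
      · subst hkk
        rw [if_pos rfl, hfilter, if_pos rfl,
          pv_filter_nil_of_not_key pre (pvCanon gap) hck hmem, List.nil_append]
        exact pv_max?_singleton gap
      · have hkm' : k ∈ pvKeys pre := by
          rcases List.mem_append.mp hkm with h' | h'
          · exact h'
          · exact absurd (List.mem_singleton.mp h') hkk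
        rw [if_neg hkk, hfilter, if_neg (fun he => hkk he.symm), List.append_nil]
        exact hv k hkm'

theorem pv_fold_inv (gaps pre : List (List (String × String)))
    (m : PySem.Dict String (List (String × String))) (h : pvInv m pre) :
    pvInv (gaps.foldl pvMergeStep m) (pre ++ gaps) := by
  induction gaps generalizing m pre with
  | nil => simpa using h
  | cons g t ih =>
    have := ih (pre ++ [g]) (pvMergeStep m g) (pv_step_inv m pre g h)
    simpa using this

-- ===== VERDICT (by name: the statement is the Claim_ definition above) =====
theorem dedupe_by_canonical_gap_py_spec : Claim_equal_dedupe_by_canonical_gap_py := by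
  intro gaps _
  unfold Spec_dedupe_by_canonical_gap_py dedupe_by_canonical_gap_py dedupe_by_canonical_gap_py_alt
  have hinv : pvInv (gaps.foldl pvMergeStep PySem.Dict.empty) gaps := by
    have := pv_fold_inv gaps [] PySem.Dict.empty
      ⟨by simp [pvKeys], by simp [pvKeys]⟩
    simpa using this
  obtain ⟨hk, hv⟩ := hinv
  rw [PySem.Dict.values_eq_map_keys _ (hk ▸ pvKeys_nodup gaps) [], hk]
  refine (List.map_congr_left ?_).symm
  intro k hkm
  simp only [pvWinner, hv k hkm, Option.getD_some]
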